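-- pv_equiv track=rewrite | github.com/MtinAMD/XO-Shift-game | agents/hard_agent.py | _precompute_lines
-- ===== SOURCE A (Python) =====
-- def _precompute_lines(n: int):
--     lines = []
--     for r in range(n):
--         lines.append([(r, c) for c in range(n)])
--     for c in range(n):
--         lines.append([(r, c) for r in range(n)])
--     lines.append([(i, i) for i in range(n)])
--     lines.append([(i, n - 1 - i) for i in range(n)])
--     return lines
-- ===== SOURCE B (Python) =====
-- def _precompute_lines(n: int):
--     rows = [[] for _ in range(n)]
--     cols = [[] for _ in range(n)]
--     diag = []
--     anti = []
--     for r in range(n):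
--         for c in range(n):
--             cell = (r, c)
--             rows[r].append(cell)
--             cols[c].append(cell)
--             if r == c:
--                 diag.append(cell)
--             if r + c == n - 1:
--                 anti.append(cell)
--     return rows + cols + [diag, anti]
-- ===== Notes on version B (the rewrite author's own statement) =====
-- stated objective: alternative
-- what changed: Instead of building every line by its own comprehension pass, B preallocates row and column buckets and makes a single scattering double pass over the grid, appending each cell to its row bucket, its column bucket, and to the diagonal or anti-diagonal lists when it lies on one.
import Mathlib
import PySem

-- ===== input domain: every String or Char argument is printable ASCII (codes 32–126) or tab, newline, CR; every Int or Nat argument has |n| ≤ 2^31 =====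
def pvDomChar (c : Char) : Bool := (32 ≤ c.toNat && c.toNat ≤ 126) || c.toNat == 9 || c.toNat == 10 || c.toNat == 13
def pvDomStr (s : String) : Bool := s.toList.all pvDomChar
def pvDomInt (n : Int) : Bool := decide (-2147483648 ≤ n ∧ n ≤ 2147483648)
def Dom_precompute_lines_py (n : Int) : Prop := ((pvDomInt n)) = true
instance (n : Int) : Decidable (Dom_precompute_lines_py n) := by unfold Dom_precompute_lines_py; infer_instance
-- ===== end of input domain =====

-- B replaces A's per-line comprehension passes by one scattering double pass over all
-- cells into preallocated row/column buckets (same cost; a different decomposition).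


-- ===== PORT A =====
def precompute_lines_py (n : Int) : List (List (Int × Int)) :=
  let lines : List (List (Int × Int)) := []
  let lines := (PySem.List.pyRange 0 n 1).foldl
    (fun lines r => lines ++ [(PySem.List.pyRange 0 n 1).map (fun c => (r, c))]) lines
  let lines := (PySem.List.pyRange 0 n 1).foldl
    (fun lines c => lines ++ [(PySem.List.pyRange 0 n 1).map (fun r => (r, c))]) lines
  let lines := lines ++ [(PySem.List.pyRange 0 n 1).map (fun i => (i, i))]
  let lines := lines ++ [(PySem.List.pyRange 0 n 1).map (fun i => (i, n - 1 - i))]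
  lines

-- ===== PORT B =====
-- one inner-loop step of Source B's double loop; `rows[r].append(cell)` / `cols[c].append(cell)`
-- is ported as set/getD at index r.toNat / c.toNat (exact: the loop indices satisfy
-- 0 ≤ r, c < n = length of the bucket lists)
def pvStepB (n r : Int)
    (st : List (List (Int × Int)) × List (List (Int × Int)) × List (Int × Int) × List (Int × Int))
    (c : Int) :
    List (List (Int × Int)) × List (List (Int × Int)) × List (Int × Int) × List (Int × Int) :=
  (st.1.set r.toNat (st.1.getD r.toNat [] ++ [(r, c)]),
   st.2.1.set c.toNat (st.2.1.getD c.toNat [] ++ [(r, c)]),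
   (if r == c then st.2.2.1 ++ [(r, c)] else st.2.2.1),
   (if r + c == n - 1 then st.2.2.2 ++ [(r, c)] else st.2.2.2))

def precompute_lines_py_alt (n : Int) : List (List (Int × Int)) :=
  let rng := PySem.List.pyRange 0 n 1
  let init : List (List (Int × Int)) × List (List (Int × Int)) × List (Int × Int) × List (Int × Int) :=
    (rng.map (fun _ => []), rng.map (fun _ => []), [], [])
  let fin := rng.foldl (fun st r => rng.foldl (pvStepB n r) st) init
  fin.1 ++ fin.2.1 ++ [fin.2.2.1, fin.2.2.2]

-- ===== PRECONDITION & SPEC =====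
def Spec_precompute_lines_py (n : Int) (out : List (List (Int × Int))) : Prop := out = precompute_lines_py_alt n
instance (n : Int) (out : List (List (Int × Int))) : Decidable (Spec_precompute_lines_py n out) := by unfold Spec_precompute_lines_py; infer_instance

-- ===== CLAIM (what is proved, stated in full; the proofs are below) =====
def Claim_equal_precompute_lines_py : Prop := ∀ (n : Int), Dom_precompute_lines_py n → Spec_precompute_lines_py n (precompute_lines_py n)

-- ===== LEMMAS AND PROOFS =====

-- repeatedly appending at one fixed bucket index collects the appended items there
theorem pvL1 (cs : List Int) (g : Int → (Int × Int)) (i : Nat) (s : List (List (Int × Int))) :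
    cs.foldl (fun s c => s.set i (s.getD i [] ++ [g c])) s = s.set i (s.getD i [] ++ cs.map g) := by
  induction cs generalizing s with
  | nil =>
    by_cases h : i < s.length
    · simp [List.getD_eq_getElem?_getD, List.getElem?_eq_getElem h, List.set_getElem_self h]
    · rw [List.foldl_nil, List.set_eq_of_length_le (le_of_not_gt h)]
  | cons c cs ih =>
    rw [List.foldl_cons, ih]
    by_cases h : i < s.length
    · rw [List.set_set]
      congr 1
      rw [List.getD_eq_getElem?_getD, List.getElem?_set_self (by simpa using h)]
      simp [List.append_assoc]
    · have h' := le_of_not_gt h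
      rw [List.set_eq_of_length_le h', List.set_eq_of_length_le h',
          List.set_eq_of_length_le (by simpa using h')]

-- a fold whose step acts componentwise on a 4-tuple is the 4-tuple of the folds
theorem pv_foldl_prod4 {α A B C D : Type} (f1 : A → α → A) (f2 : B → α → B)
    (f3 : C → α → C) (f4 : D → α → D) (xs : List α) (st : A × B × C × D) :
    xs.foldl (fun st x => (f1 st.1 x, f2 st.2.1 x, f3 st.2.2.1 x, f4 st.2.2.2 x)) st
      = (xs.foldl f1 st.1, xs.foldl f2 st.2.1, xs.foldl f3 st.2.2.1, xs.foldl f4 st.2.2.2) := by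
  induction xs generalizing st with
  | nil => rfl
  | cons x xs ih => simp [List.foldl_cons, ih]

theorem pv_rng (n : Int) :
    PySem.List.pyRange 0 n 1 = (List.range n.toNat).map (fun j => ((j : Nat) : Int)) := by
  rw [PySem.List.pyRange_one]; simp only [Int.sub_zero]
  exact List.map_congr_left (fun k _ => by simp)

-- filling the row buckets one full row at a time
theorem pvL2 (k : Nat) (w : Int → List (Int × Int)) : ∀ m, m ≤ k →
    ((List.range m).map (fun j => ((j : Nat) : Int))).foldl
        (fun s r => s.set r.toNat (s.getD r.toNat [] ++ w r)) ((List.range k).map (fun _ => []))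
      = (List.range k).map (fun j => if j < m then w ((j : Nat) : Int) else []) := by
  intro m
  induction m with
  | zero => intro _; simp
  | succ m ih =>
    intro h
    rw [List.range_succ, List.map_append, List.foldl_append, ih (by omega)]
    simp only [List.map_cons, List.map_nil, List.foldl_cons, List.foldl_nil, Int.toNat_natCast]
    have hm : m < k := by omega
    have hget : (((List.range k).map (fun j => if j < m then w ((j : Nat) : Int) else [])).getD m [])
        = [] := by
      rw [List.getD_eq_getElem?_getD]
      simp [List.getElem?_map, List.getElem?_range hm]
    rw [hget]
    apply List.ext_getElem
    · simp
    · intro j h1 h2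
      simp only [List.getElem_set, List.getElem_map, List.getElem_range] at *
      have hj : j < k := by simpa using h1
      split_ifs with h3 h4 h5 <;> simp_all <;> omega

-- one sweep of the inner loop extends every column bucket by one cell
theorem pvL3 (k : Nat) (r : Int) (g : Nat → List (Int × Int)) : ∀ j, j ≤ k →
    ((List.range j).map (fun c => ((c : Nat) : Int))).foldl
        (fun s c => s.set c.toNat (s.getD c.toNat [] ++ [(r, c)])) ((List.range k).map (fun c => g c))
      = (List.range k).map (fun c => if c < j then g c ++ [(r, ((c : Nat) : Int))] else g c) := by
  intro j
  induction j with
  | zero => intro _; simp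
  | succ j ih =>
    intro h
    rw [List.range_succ, List.map_append, List.foldl_append, ih (by omega)]
    simp only [List.map_cons, List.map_nil, List.foldl_cons, List.foldl_nil, Int.toNat_natCast]
    have hj : j < k := by omega
    have hget : (((List.range k).map (fun c => if c < j then g c ++ [(r, ((c : Nat) : Int))] else g c)).getD j [])
        = g j := by
      rw [List.getD_eq_getElem?_getD]
      simp [List.getElem?_map, List.getElem?_range hj]
    rw [hget]
    apply List.ext_getElem
    · simp
    · intro i h1 h2
      simp only [List.getElem_set, List.getElem_map, List.getElem_range] at *
      have hi : i < k := by simpa using h1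
      split_ifs with h3 h4 h5 <;> simp_all <;> omega

-- the column buckets after the whole double loop
theorem pvL4 (k : Nat) : ∀ m, m ≤ k →
    ((List.range m).map (fun j => ((j : Nat) : Int))).foldl
        (fun s r => ((List.range k).map (fun c => ((c : Nat) : Int))).foldl
            (fun s c => s.set c.toNat (s.getD c.toNat [] ++ [(r, c)])) s)
        ((List.range k).map (fun _ => []))
      = (List.range k).map (fun c => (List.range m).map (fun r => (((r : Nat) : Int), ((c : Nat) : Int)))) := by
  intro m
  induction m with
  | zero => intro _; simp
  | succ m ih =>
    intro h
    rw [List.range_succ, List.map_append, List.foldl_append, ih (by omega)]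
    simp only [List.map_cons, List.map_nil, List.foldl_cons, List.foldl_nil]
    rw [pvL3 k _ _ k le_rfl]
    apply List.ext_getElem
    · simp
    · intro i h1 h2
      simp only [List.getElem_map, List.getElem_range] at *
      have hi : i < k := by simpa using h1
      rw [if_pos hi, List.map_append]; rfl

-- row r meets the main diagonal in exactly the cell (r, r)
theorem pvL5 (n r : Int) (h0 : 0 ≤ r) (hn : r < n) :
    (PySem.List.pyRange 0 n 1).filter (fun c => r == c) = [r] := by
  rw [PySem.List.pyRange_one_append 0 r n h0 (le_of_lt hn), PySem.List.pyRange_one_cons hn]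
  rw [List.filter_append, List.filter_cons]
  have h1 : (PySem.List.pyRange 0 r 1).filter (fun c => r == c) = [] := by
    rw [List.filter_eq_nil_iff]; intro a ha
    rw [PySem.List.mem_pyRange_one] at ha
    simp; omega
  have h2 : (PySem.List.pyRange (r+1) n 1).filter (fun c => r == c) = [] := by
    rw [List.filter_eq_nil_iff]; intro a ha
    rw [PySem.List.mem_pyRange_one] at ha
    simp; omega
  simp [h1, h2]

-- row r meets the anti-diagonal in exactly the cell (r, n-1-r)
theorem pvL6 (n r : Int) (h0 : 0 ≤ r) (hn : r < n) :
    (PySem.List.pyRange 0 n 1).filter (fun c => r + c == n - 1) = [n - 1 - r] := by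
  have ha : (0 : Int) ≤ n - 1 - r := by omega
  have hb : n - 1 - r < n := by omega
  rw [PySem.List.pyRange_one_append 0 (n - 1 - r) n ha (le_of_lt hb), PySem.List.pyRange_one_cons hb]
  rw [List.filter_append, List.filter_cons]
  have h1 : (PySem.List.pyRange 0 (n - 1 - r) 1).filter (fun c => r + c == n - 1) = [] := by
    rw [List.filter_eq_nil_iff]; intro a hmem
    rw [PySem.List.mem_pyRange_one] at hmem
    simp; omega
  have h2 : (PySem.List.pyRange (n - 1 - r + 1) n 1).filter (fun c => r + c == n - 1) = [] := by
    rw [List.filter_eq_nil_iff]; intro a hmem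
    rw [PySem.List.mem_pyRange_one] at hmem
    simp; omega
  simp [h1, h2]

theorem pv_ports_eq (n : Int) : precompute_lines_py n = precompute_lines_py_alt n := by
  unfold precompute_lines_py precompute_lines_py_alt
  simp only
  have hinner : ∀ (r : Int)
      (st : List (List (Int × Int)) × List (List (Int × Int)) × List (Int × Int) × List (Int × Int)),
      (PySem.List.pyRange 0 n 1).foldl (pvStepB n r) st =
        ((PySem.List.pyRange 0 n 1).foldl (fun s c => s.set r.toNat (s.getD r.toNat [] ++ [(r, c)])) st.1,
         (PySem.List.pyRange 0 n 1).foldl (fun s c => s.set c.toNat (s.getD c.toNat [] ++ [(r, c)])) st.2.1,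
         (PySem.List.pyRange 0 n 1).foldl (fun d c => if r == c then d ++ [(r, c)] else d) st.2.2.1,
         (PySem.List.pyRange 0 n 1).foldl (fun d c => if r + c == n - 1 then d ++ [(r, c)] else d) st.2.2.2) := by
    intro r st
    unfold pvStepB
    exact pv_foldl_prod4
      (fun s c => s.set r.toNat (s.getD r.toNat [] ++ [(r, c)]))
      (fun s c => s.set c.toNat (s.getD c.toNat [] ++ [(r, c)]))
      (fun d c => if r == c then d ++ [(r, c)] else d)
      (fun d c => if r + c == n - 1 then d ++ [(r, c)] else d)
      (PySem.List.pyRange 0 n 1) st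
  have hstepEq :
      (fun (st : List (List (Int × Int)) × List (List (Int × Int)) × List (Int × Int) × List (Int × Int))
           (r : Int) => (PySem.List.pyRange 0 n 1).foldl (pvStepB n r) st)
      = (fun st r =>
          ((PySem.List.pyRange 0 n 1).foldl (fun s c => s.set r.toNat (s.getD r.toNat [] ++ [(r, c)])) st.1,
           (PySem.List.pyRange 0 n 1).foldl (fun s c => s.set c.toNat (s.getD c.toNat [] ++ [(r, c)])) st.2.1,
           (PySem.List.pyRange 0 n 1).foldl (fun d c => if r == c then d ++ [(r, c)] else d) st.2.2.1,
           (PySem.List.pyRange 0 n 1).foldl (fun d c => if r + c == n - 1 then d ++ [(r, c)] else d) st.2.2.2)) :=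
    funext fun st => funext fun r => hinner r st
  rw [hstepEq]
  have houter := pv_foldl_prod4
      (fun s r => (PySem.List.pyRange 0 n 1).foldl (fun s c => s.set r.toNat (s.getD r.toNat [] ++ [(r, c)])) s)
      (fun s r => (PySem.List.pyRange 0 n 1).foldl (fun s c => s.set c.toNat (s.getD c.toNat [] ++ [(r, c)])) s)
      (fun d r => (PySem.List.pyRange 0 n 1).foldl (fun d c => if r == c then d ++ [(r, c)] else d) d)
      (fun d r => (PySem.List.pyRange 0 n 1).foldl (fun d c => if r + c == n - 1 then d ++ [(r, c)] else d) d)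
      (PySem.List.pyRange 0 n 1)
      ((PySem.List.pyRange 0 n 1).map (fun _ => ([] : List (Int × Int))),
       (PySem.List.pyRange 0 n 1).map (fun _ => ([] : List (Int × Int))), [], [])
  rw [houter]
  have hdiag : (PySem.List.pyRange 0 n 1).foldl
      (fun d r => (PySem.List.pyRange 0 n 1).foldl (fun d c => if r == c then d ++ [(r, c)] else d) d)
      ([] : List (Int × Int)) = (PySem.List.pyRange 0 n 1).map (fun i => (i, i)) := by
    have hcong : ∀ (d : List (Int × Int)) (r : Int), r ∈ PySem.List.pyRange 0 n 1 →
        (PySem.List.pyRange 0 n 1).foldl (fun d c => if r == c then d ++ [(r, c)] else d) d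
          = d ++ [(r, r)] := by
      intro d r hr
      rw [PySem.List.mem_pyRange_one] at hr
      rw [PySem.List.foldl_append_if (fun c => r == c) (fun c => (r, c)), pvL5 n r hr.1 hr.2]
      rfl
    rw [PySem.List.foldl_congr_mem (PySem.List.pyRange 0 n 1) _ (fun d r => d ++ [(r, r)]) [] hcong,
        PySem.List.foldl_append_singleton_eq_map]
    rfl
  have hanti : (PySem.List.pyRange 0 n 1).foldl
      (fun d r => (PySem.List.pyRange 0 n 1).foldl (fun d c => if r + c == n - 1 then d ++ [(r, c)] else d) d)
      ([] : List (Int × Int)) = (PySem.List.pyRange 0 n 1).map (fun i => (i, n - 1 - i)) := by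
    have hcong : ∀ (d : List (Int × Int)) (r : Int), r ∈ PySem.List.pyRange 0 n 1 →
        (PySem.List.pyRange 0 n 1).foldl (fun d c => if r + c == n - 1 then d ++ [(r, c)] else d) d
          = d ++ [(r, n - 1 - r)] := by
      intro d r hr
      rw [PySem.List.mem_pyRange_one] at hr
      rw [PySem.List.foldl_append_if (fun c => r + c == n - 1) (fun c => (r, c)), pvL6 n r hr.1 hr.2]
      rfl
    rw [PySem.List.foldl_congr_mem (PySem.List.pyRange 0 n 1) _ (fun d r => d ++ [(r, n - 1 - r)]) [] hcong,
        PySem.List.foldl_append_singleton_eq_map]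
    rfl
  rw [hdiag, hanti]
  rw [PySem.List.foldl_append_singleton_eq_map, PySem.List.foldl_append_singleton_eq_map]
  rw [pv_rng n]
  simp only [pvL1, List.map_map, Function.comp_def]
  rw [pvL2 n.toNat _ n.toNat le_rfl, pvL4 n.toNat n.toNat le_rfl]
  simp [List.append_assoc]
  intro a h1 h2
  omega

-- ===== VERDICT (by name: the statement is the Claim_ definition above) =====
theorem precompute_lines_py_spec : Claim_equal_precompute_lines_py := by
  intro n _
  unfold Spec_precompute_lines_py
  exact pv_ports_eq n
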